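-- pv_equiv track=rewrite | github.com/chiimagnus/LonelyPianist | piano_dialogue_server/server/rule_backend.py | _nearest_pitch
-- ===== SOURCE A (Python) =====
-- def _nearest_pitch(target: int, allowed_pitch_classes: list[int], low: int, high: int) -> int:
--     candidates = [
--         pitch
--         for pitch in range(low, high + 1)
--         if pitch % 12 in allowed_pitch_classes
--     ]
--     if not candidates:
--         return max(low, min(high, target))
--     return min(candidates, key=lambda pitch: (abs(pitch - target), pitch))
-- ===== SOURCE B (Python) =====
-- def _class_nearest(target: int, low: int, high: int, pc: int):
--     """Nearest pitch of class pc inside [low, high] under key (abs(p-target), p),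
--     or None if the class has no pitch in range."""
--     lo = low + (pc - low) % 12          # smallest pitch >= low in class pc
--     if lo > high:
--         return None
--     hi = high - (high - pc) % 12        # largest pitch <= high in class pc
--     if target <= lo:
--         return lo
--     if target >= hi:
--         return hi
--     below = target - (target - pc) % 12
--     return below if target - below <= 6 else below + 12
--
--
-- def _nearest_pitch(target: int, allowed_pitch_classes: list[int], low: int, high: int) -> int:
--     best = None  # (distance, pitch)
--     for pc in range(12):
--         if pc in allowed_pitch_classes:
--             p = _class_nearest(target, low, high, pc)
--             if p is None:
--                 continue
--             key = (abs(p - target), p)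
--             if best is None or key < best:
--                 best = key
--     if best is None:
--         return max(low, min(high, target))
--     return best[1]
-- ===== Notes on version B (the rewrite author's own statement) =====
-- stated objective: alternative
-- what changed: Instead of scanning every pitch in range(low, high+1) and taking min with a key, B loops over the 12 pitch classes, computes the nearest in-range pitch of each allowed class by modular arithmetic, and takes the best by the same key.
import Mathlib
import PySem

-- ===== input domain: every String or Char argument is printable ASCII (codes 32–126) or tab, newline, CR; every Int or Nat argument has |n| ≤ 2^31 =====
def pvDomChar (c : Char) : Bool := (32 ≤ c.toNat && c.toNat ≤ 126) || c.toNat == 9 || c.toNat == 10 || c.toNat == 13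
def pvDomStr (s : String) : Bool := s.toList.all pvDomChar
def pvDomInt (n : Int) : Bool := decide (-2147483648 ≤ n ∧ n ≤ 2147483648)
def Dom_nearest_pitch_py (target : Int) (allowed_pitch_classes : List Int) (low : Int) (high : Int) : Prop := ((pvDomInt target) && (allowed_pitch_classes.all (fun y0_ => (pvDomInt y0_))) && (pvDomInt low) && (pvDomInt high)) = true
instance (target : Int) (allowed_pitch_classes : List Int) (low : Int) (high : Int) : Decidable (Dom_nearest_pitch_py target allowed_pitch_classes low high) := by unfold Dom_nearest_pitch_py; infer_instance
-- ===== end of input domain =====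

-- B replaces A's scan of every pitch in range(low, high+1) by per-pitch-class modular
-- arithmetic: one candidate per allowed pitch class, best taken under the same key.


-- ===== PORT A =====
def nearest_pitch_py (target : Int) (allowed_pitch_classes : List Int) (low : Int) (high : Int) : Int :=
  let candidates := (PySem.List.pyRange low (high + 1) 1).filter
    (fun pitch => decide (PySem.Int.mod pitch 12 ∈ allowed_pitch_classes))
  -- Python: `if not candidates: return max(low, min(high, target))` — min2? is none exactly on []
  match PySem.List.min2? candidates (fun pitch => |pitch - target|) (fun pitch => pitch) with
  | none => max low (min high target)
  | some m => m

-- ===== PORT B =====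
-- helper _class_nearest of Source B: nearest in-range pitch of class pc, none if class empty in range
def pvClassNearest (target low high pc : Int) : Option Int :=
  let lo := low + PySem.Int.mod (pc - low) 12
  if lo > high then none
  else
    let hi := high - PySem.Int.mod (high - pc) 12
    if target ≤ lo then some lo
    else if target ≥ hi then some hi
    else
      let below := target - PySem.Int.mod (target - pc) 12
      some (if target - below ≤ 6 then below else below + 12)

-- loop body of Source B's `for pc in range(12)` (tuple `<` is lexicographic)
def pvBStep (target low high : Int) (al : List Int) (best : Option (Int × Int)) (pc : Int) :
    Option (Int × Int) :=
  if pc ∈ al then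
    match pvClassNearest target low high pc with
    | none => best
    | some p =>
      let key : Int × Int := (|p - target|, p)
      match best with
      | none => some key
      | some b => if key.1 < b.1 ∨ (key.1 = b.1 ∧ key.2 < b.2) then some key else some b
  else best

def nearest_pitch_py_alt (target : Int) (allowed_pitch_classes : List Int) (low : Int) (high : Int) : Int :=
  match (PySem.List.pyRange 0 12 1).foldl
      (pvBStep target low high allowed_pitch_classes) none with
  | none => max low (min high target)
  | some b => b.2

-- ===== PRECONDITION & SPEC =====
def Spec_nearest_pitch_py (target : Int) (allowed_pitch_classes : List Int) (low : Int) (high : Int) (out : Int) : Prop := out = nearest_pitch_py_alt target allowed_pitch_classes low high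
instance (target : Int) (allowed_pitch_classes : List Int) (low : Int) (high : Int) (out : Int) : Decidable (Spec_nearest_pitch_py target allowed_pitch_classes low high out) := by unfold Spec_nearest_pitch_py; infer_instance

-- ===== CLAIM (what is proved, stated in full; the proofs are below) =====
def Claim_equal_nearest_pitch_py : Prop := ∀ (target : Int) (allowed_pitch_classes : List Int) (low : Int) (high : Int), Dom_nearest_pitch_py target allowed_pitch_classes low high → Spec_nearest_pitch_py target allowed_pitch_classes low high (nearest_pitch_py target allowed_pitch_classes low high)

-- ===== LEMMAS AND PROOFS =====

-- Python's min-key order: strictly smaller distance, or equal distance and pitch ≤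
def pvLE (t p q : Int) : Prop := |p - t| < |q - t| ∨ (|p - t| = |q - t| ∧ p ≤ q)

lemma pvmod12 (x : Int) : PySem.Int.mod x 12 = x % 12 :=
  PySem.Int.mod_eq_emod_of_pos (by norm_num)

lemma pvLE_refl (t p : Int) : pvLE t p p := Or.inr ⟨rfl, le_refl p⟩

lemma pvLE_trans {t p q r : Int} (h1 : pvLE t p q) (h2 : pvLE t q r) : pvLE t p r := by
  simp only [pvLE, Int.abs_eq_natAbs] at *; omega

lemma pvLE_antisymm {t p q : Int} (h1 : pvLE t p q) (h2 : pvLE t q p) : p = q := by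
  simp only [pvLE, Int.abs_eq_natAbs] at *; omega

-- the step of PySem.List.min2? with key (|· - t|, ·), in propositional form
def pvStep (t : Int) (acc : Option Int) (x : Int) : Option Int :=
  match acc with
  | none => some x
  | some m => if |x - t| < |m - t| ∨ (¬ |m - t| < |x - t| ∧ x < m) then some x else some m

lemma min2?_eq_foldl (t : Int) (xs : List Int) :
    PySem.List.min2? xs (fun p => |p - t|) (fun p => p) = xs.foldl (pvStep t) none := by
  unfold PySem.List.min2?
  congr 1
  funext acc x
  cases acc with
  | none => rfl
  | some m =>
    simp only [pvStep, Bool.or_eq_true, Bool.and_eq_true, Bool.not_eq_true',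
      decide_eq_true_eq, decide_eq_false_iff_not]

lemma pvStep_isSome (t : Int) (acc : Option Int) (x : Int) :
    ∃ b, pvStep t acc x = some b := by
  unfold pvStep
  cases acc with
  | none => exact ⟨x, rfl⟩
  | some m =>
    by_cases h : |x - t| < |m - t| ∨ (¬ |m - t| < |x - t| ∧ x < m)
    · exact ⟨x, if_pos h⟩
    · exact ⟨m, if_neg h⟩

lemma pvFold_ne_none (t : Int) : ∀ (xs : List Int) (a : Int),
    xs.foldl (pvStep t) (some a) ≠ none := by
  intro xs
  induction xs with
  | nil => intro a h; simp at h
  | cons x r ih =>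
    intro a
    rw [List.foldl_cons]
    obtain ⟨b, hb⟩ := pvStep_isSome t (some a) x
    rw [hb]
    exact ih b

lemma pvFold_some (t : Int) : ∀ (xs : List Int) (a m : Int),
    xs.foldl (pvStep t) (some a) = some m →
    (m = a ∨ m ∈ xs) ∧ pvLE t m a ∧ ∀ q ∈ xs, pvLE t m q := by
  intro xs
  induction xs with
  | nil =>
    intro a m h
    simp only [List.foldl_nil, Option.some.injEq] at h
    subst h
    exact ⟨Or.inl rfl, pvLE_refl _ _, by simp⟩
  | cons x r ih =>
    intro a m h
    rw [List.foldl_cons] at h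
    have hstep : pvStep t (some a) x =
        if |x - t| < |a - t| ∨ (¬ |a - t| < |x - t| ∧ x < a) then some x else some a := rfl
    by_cases hc : |x - t| < |a - t| ∨ (¬ |a - t| < |x - t| ∧ x < a)
    · rw [hstep, if_pos hc] at h
      obtain ⟨hmem, hma, hall⟩ := ih x m h
      have hxa : pvLE t x a := by
        simp only [Int.abs_eq_natAbs] at hc
        simp only [pvLE, Int.abs_eq_natAbs]; omega
      refine ⟨?_, pvLE_trans hma hxa, ?_⟩
      · rcases hmem with rfl | hm
        · exact Or.inr (List.mem_cons_self)
        · exact Or.inr (List.mem_cons_of_mem _ hm)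
      · intro q hq
        rcases List.mem_cons.mp hq with rfl | hq'
        · exact hma
        · exact hall q hq'
    · rw [hstep, if_neg hc] at h
      obtain ⟨hmem, hma, hall⟩ := ih a m h
      have hax : pvLE t a x := by
        simp only [Int.abs_eq_natAbs] at hc
        simp only [pvLE, Int.abs_eq_natAbs]; omega
      refine ⟨?_, hma, ?_⟩
      · rcases hmem with rfl | hm
        · exact Or.inl rfl
        · exact Or.inr (List.mem_cons_of_mem _ hm)
      · intro q hq
        rcases List.mem_cons.mp hq with rfl | hq'
        · exact pvLE_trans hma hax
        · exact hall q hq'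

-- membership in A's candidate list
lemma mem_candidates (al : List Int) (low high q : Int) :
    q ∈ (PySem.List.pyRange low (high + 1) 1).filter
        (fun pitch => decide (PySem.Int.mod pitch 12 ∈ al)) ↔
      low ≤ q ∧ q ≤ high ∧ q % 12 ∈ al := by
  simp only [List.mem_filter, PySem.List.mem_pyRange_one, pvmod12, decide_eq_true_eq]
  constructor
  · rintro ⟨⟨h1, h2⟩, h3⟩; exact ⟨h1, by omega, h3⟩
  · rintro ⟨h1, h2, h3⟩; exact ⟨⟨h1, by omega⟩, h3⟩

-- the class helper is correct: some p gives the key-minimal in-range pitch of class pc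
lemma classNearest_none (t low high pc : Int) (h0 : 0 ≤ pc) (h12 : pc < 12)
    (h : pvClassNearest t low high pc = none) :
    ∀ q, low ≤ q → q ≤ high → q % 12 ≠ pc := by
  unfold pvClassNearest at h
  simp only [pvmod12] at h
  split at h
  · rename_i hlo
    intro q hq1 hq2 heq
    omega
  · split at h
    · simp at h
    · split at h <;> simp at h

lemma classNearest_some (t low high pc p : Int) (h0 : 0 ≤ pc) (h12 : pc < 12)
    (h : pvClassNearest t low high pc = some p) :
    low ≤ p ∧ p ≤ high ∧ p % 12 = pc ∧
      ∀ q, low ≤ q → q ≤ high → q % 12 = pc → pvLE t p q := by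
  unfold pvClassNearest at h
  simp only [pvmod12] at h
  split at h
  · simp at h
  · rename_i hlo
    push_neg at hlo
    split at h
    · -- target ≤ lo
      rename_i hle
      simp only [Option.some.injEq] at h
      subst h
      refine ⟨by omega, by omega, by omega, ?_⟩
      intro q hq1 hq2 hq3
      simp only [pvLE, Int.abs_eq_natAbs]
      omega
    · split at h
      · -- target ≥ hi
        rename_i h1 h2
        simp only [Option.some.injEq] at h
        subst h
        refine ⟨by omega, by omega, by omega, ?_⟩
        intro q hq1 hq2 hq3
        simp only [pvLE, Int.abs_eq_natAbs]
        omega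
      · -- strictly inside
        rename_i h1 h2
        push_neg at h1 h2
        simp only [Option.some.injEq] at h
        subst h
        constructor
        · split <;> omega
        constructor
        · split <;> omega
        constructor
        · split <;> omega
        · intro q hq1 hq2 hq3
          simp only [pvLE, Int.abs_eq_natAbs]
          split <;> omega

-- invariant of B's loop over the pitch classes processed so far
def pvInv (t low high : Int) (al : List Int) (seen : List Int) (acc : Option (Int × Int)) : Prop :=
  match acc with
  | none => ∀ q, low ≤ q → q ≤ high → q % 12 ∈ seen → q % 12 ∉ al
  | some (d, p) => low ≤ p ∧ p ≤ high ∧ p % 12 ∈ seen ∧ p % 12 ∈ al ∧ d = |p - t| ∧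
      ∀ q, low ≤ q → q ≤ high → q % 12 ∈ seen → q % 12 ∈ al → pvLE t p q

lemma stepB_inv (t low high : Int) (al seen : List Int) (acc : Option (Int × Int)) (pc : Int)
    (hpc : 0 ≤ pc ∧ pc < 12) (h : pvInv t low high al seen acc) :
    pvInv t low high al (seen ++ [pc]) (pvBStep t low high al acc pc) := by
  unfold pvBStep
  by_cases hin : pc ∈ al
  · rw [if_pos hin]
    cases hcn : pvClassNearest t low high pc with
    | none =>
      have hempty := classNearest_none t low high pc hpc.1 hpc.2 hcn
      cases acc with
      | none =>
        intro q hq1 hq2 hq3 hq4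
        rcases List.mem_append.mp hq3 with hq | hq
        · exact h q hq1 hq2 hq hq4
        · exact hempty q hq1 hq2 (List.mem_singleton.mp hq)
      | some b =>
        obtain ⟨b1, b2⟩ := b
        obtain ⟨h1, h2, h3, h3', h4, h5⟩ := h
        refine ⟨h1, h2, by simp [h3], h3', h4, ?_⟩
        intro q hq1 hq2 hq3 hq4
        rcases List.mem_append.mp hq3 with hq | hq
        · exact h5 q hq1 hq2 hq hq4
        · exact absurd (List.mem_singleton.mp hq) (hempty q hq1 hq2)
    | some p =>
      obtain ⟨hp1, hp2, hp3, hp4⟩ := classNearest_some t low high pc p hpc.1 hpc.2 hcn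
      cases acc with
      | none =>
        refine ⟨hp1, hp2, by simp [hp3], by rw [hp3]; exact hin, rfl, ?_⟩
        intro q hq1 hq2 hq3 hq4
        rcases List.mem_append.mp hq3 with hq | hq
        · exact absurd hq4 (h q hq1 hq2 hq)
        · exact hp4 q hq1 hq2 (List.mem_singleton.mp hq)
      | some b =>
        obtain ⟨b1, b2⟩ := b
        obtain ⟨h1, h2, h3, h3', h4, h5⟩ := h
        show pvInv t low high al (seen ++ [pc])
          (if |p - t| < b1 ∨ (|p - t| = b1 ∧ p < b2) then some (|p - t|, p) else some (b1, b2))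
        by_cases hcond : |p - t| < b1 ∨ (|p - t| = b1 ∧ p < b2)
        · rw [if_pos hcond]
          have hpb : pvLE t p b2 := by
            subst h4
            simp only [Int.abs_eq_natAbs] at hcond
            simp only [pvLE, Int.abs_eq_natAbs]
            omega
          refine ⟨hp1, hp2, by simp [hp3], by rw [hp3]; exact hin, rfl, ?_⟩
          intro q hq1 hq2 hq3 hq4
          rcases List.mem_append.mp hq3 with hq | hq
          · exact pvLE_trans hpb (h5 q hq1 hq2 hq hq4)
          · exact hp4 q hq1 hq2 (List.mem_singleton.mp hq)
        · rw [if_neg hcond]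
          have hbp : pvLE t b2 p := by
            subst h4
            simp only [Int.abs_eq_natAbs] at hcond
            simp only [pvLE, Int.abs_eq_natAbs]
            omega
          refine ⟨h1, h2, by simp [h3], h3', h4, ?_⟩
          intro q hq1 hq2 hq3 hq4
          rcases List.mem_append.mp hq3 with hq | hq
          · exact h5 q hq1 hq2 hq hq4
          · exact pvLE_trans hbp (hp4 q hq1 hq2 (List.mem_singleton.mp hq))
  · rw [if_neg hin]
    cases acc with
    | none =>
      intro q hq1 hq2 hq3 hq4
      rcases List.mem_append.mp hq3 with hq | hq
      · exact h q hq1 hq2 hq hq4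
      · exact hin ((List.mem_singleton.mp hq) ▸ hq4)
    | some b =>
      obtain ⟨b1, b2⟩ := b
      obtain ⟨h1, h2, h3, h3', h4, h5⟩ := h
      refine ⟨h1, h2, by simp [h3], h3', h4, ?_⟩
      intro q hq1 hq2 hq3 hq4
      rcases List.mem_append.mp hq3 with hq | hq
      · exact h5 q hq1 hq2 hq hq4
      · exact absurd ((List.mem_singleton.mp hq) ▸ hq4) hin

lemma foldB_inv (t low high : Int) (al : List Int) :
    ∀ (pcs seen : List Int) (acc : Option (Int × Int)),
    (∀ pc ∈ pcs, 0 ≤ pc ∧ pc < 12) →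
    pvInv t low high al seen acc →
    pvInv t low high al (seen ++ pcs) (pcs.foldl (pvBStep t low high al) acc) := by
  intro pcs
  induction pcs with
  | nil => intro seen acc _ h; simpa using h
  | cons pc r ih =>
    intro seen acc hall h
    rw [List.foldl_cons]
    have hpc : 0 ≤ pc ∧ pc < 12 := hall pc List.mem_cons_self
    have := ih (seen ++ [pc]) _ (fun c hc => hall c (List.mem_cons_of_mem _ hc))
      (stepB_inv t low high al seen acc pc hpc h)
    simpa [List.append_assoc] using this

-- ===== VERDICT (by name: the statement is the Claim_ definition above) =====
theorem nearest_pitch_py_spec : Claim_equal_nearest_pitch_py := by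
  intro t al low high _
  unfold Spec_nearest_pitch_py nearest_pitch_py nearest_pitch_py_alt
  have hseen : ∀ q : Int, q % 12 ∈ PySem.List.pyRange 0 12 1 := by
    intro q
    rw [PySem.List.mem_pyRange_one]
    omega
  have hcls : ∀ pc ∈ PySem.List.pyRange 0 12 1, 0 ≤ pc ∧ pc < 12 := by
    intro pc hpc
    rw [PySem.List.mem_pyRange_one] at hpc
    omega
  have hinv : pvInv t low high al (PySem.List.pyRange 0 12 1)
      ((PySem.List.pyRange 0 12 1).foldl (pvBStep t low high al) none) := by
    have := foldB_inv t low high al (PySem.List.pyRange 0 12 1) [] none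
      hcls (by intro q _ _ hq; simp at hq)
    simpa using this
  cases hacc : (PySem.List.pyRange 0 12 1).foldl (pvBStep t low high al) none with
  | none =>
    rw [hacc] at hinv
    have hnil : (PySem.List.pyRange low (high + 1) 1).filter
        (fun pitch => decide (PySem.Int.mod pitch 12 ∈ al)) = [] := by
      rw [List.eq_nil_iff_forall_not_mem]
      intro q hq
      obtain ⟨h1, h2, h3⟩ := (mem_candidates al low high q).mp hq
      exact hinv q h1 h2 (hseen q) h3
    simp only [hnil]
    rfl
  | some b =>
    obtain ⟨d, p⟩ := b
    rw [hacc] at hinv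
    obtain ⟨hp1, hp2, _, hp3, _, hmin⟩ := hinv
    have hpmem : p ∈ (PySem.List.pyRange low (high + 1) 1).filter
        (fun pitch => decide (PySem.Int.mod pitch 12 ∈ al)) :=
      (mem_candidates al low high p).mpr ⟨hp1, hp2, hp3⟩
    cases hcand : (PySem.List.pyRange low (high + 1) 1).filter
        (fun pitch => decide (PySem.Int.mod pitch 12 ∈ al)) with
    | nil => rw [hcand] at hpmem; simp at hpmem
    | cons c rest =>
      rw [hcand] at hpmem
      simp only [min2?_eq_foldl, List.foldl_cons]
      show (match rest.foldl (pvStep t) (pvStep t none c) with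
        | none => max low (min high t) | some m => m) = p
      cases hm : rest.foldl (pvStep t) (pvStep t none c) with
      | none => exact absurd hm (pvFold_ne_none t rest c)
      | some m =>
        obtain ⟨hmem, hma, hall⟩ := pvFold_some t rest c m hm
        have hmS : m ∈ c :: rest := by
          rcases hmem with rfl | h
          · exact List.mem_cons_self
          · exact List.mem_cons_of_mem _ h
        have hmin_m : ∀ q ∈ c :: rest, pvLE t m q := by
          intro q hq
          rcases List.mem_cons.mp hq with rfl | hq'
          · exact hma
          · exact hall q hq'
        have h1 : pvLE t m p := hmin_m p hpmem
        have h2 : pvLE t p m := by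
          obtain ⟨g1, g2, g3⟩ := (mem_candidates al low high m).mp (hcand ▸ hmS)
          exact hmin m g1 g2 (hseen m) g3
        exact pvLE_antisymm h1 h2
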